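-- pv_equiv track=rewrite | github.com/jw2633/Python-Coursework | Homework/HW5.py | exclamation
-- ===== SOURCE A (Python) =====
-- def exclamation(string):
--     newString = ""
--     vowels = ['a', 'e', 'i', 'o', 'u']
--     for letter in string:
--         if letter in vowels:
--             newString += (letter * 4)
--         else:
--             newString += letter
--     newString += "!"
--     return newString
-- ===== SOURCE B (Python) =====
-- def exclamation(string):
--     for v in "aeiou":
--         string = string.replace(v, v * 4)
--     return string + "!"
-- ===== Notes on version B (the rewrite author's own statement) =====
-- stated objective: simpler
-- what changed: Replaces the per-character loop with membership tests by five staged whole-string str.replace passes, one per vowel (correct because each replacement only produces copies of its own vowel, so the stages cannot interfere); the per-character Python loop disappears.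
import Mathlib
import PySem

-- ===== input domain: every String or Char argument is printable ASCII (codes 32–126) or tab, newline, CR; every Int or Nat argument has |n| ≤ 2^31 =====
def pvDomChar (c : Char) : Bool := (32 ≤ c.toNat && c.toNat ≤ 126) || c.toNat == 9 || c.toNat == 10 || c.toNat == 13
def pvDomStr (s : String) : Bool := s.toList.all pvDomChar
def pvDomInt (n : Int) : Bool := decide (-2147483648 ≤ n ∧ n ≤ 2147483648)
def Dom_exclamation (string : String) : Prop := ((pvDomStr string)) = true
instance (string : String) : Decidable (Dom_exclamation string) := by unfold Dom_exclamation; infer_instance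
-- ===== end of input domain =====

-- B replaces A's per-character loop with five staged whole-string replace passes, one per vowel (simpler; stages cannot interfere since each pass only produces copies of its own vowel).

-- ===== PORT A =====
-- the loop: for letter in string: newString += letter*4 if vowel else letter
def exclamationLoop : List Char → String → String
  | [], acc => acc
  | c :: rest, acc =>
      exclamationLoop rest
        (if c ∈ ['a', 'e', 'i', 'o', 'u'] then acc ++ String.ofList [c, c, c, c]
         else acc ++ String.ofList [c])

def exclamation (string : String) : String :=
  exclamationLoop string.toList "" ++ "!"

-- ===== PORT B =====
-- for v in "aeiou": string = string.replace(v, v * 4); return string + "!"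
def exclamation_alt (string : String) : String :=
  ("aeiou".toList.foldl
    (fun t v => PySem.Str.replace t (String.ofList [v]) (String.ofList [v, v, v, v])) string) ++ "!"

-- ===== PRECONDITION & SPEC =====
def Spec_exclamation (string : String) (out : String) : Prop := out = exclamation_alt string
instance (string : String) (out : String) : Decidable (Spec_exclamation string out) := by unfold Spec_exclamation; infer_instance

-- ===== CLAIM (what is proved, stated in full; the proofs are below) =====
def Claim_equal_exclamation : Prop := ∀ (string : String), Dom_exclamation string → Spec_exclamation string (exclamation string)

-- ===== LEMMAS AND PROOFS =====

-- what each character contributes in the end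
def pvQuad (c : Char) : List Char := if c ∈ ['a', 'e', 'i', 'o', 'u'] then [c, c, c, c] else [c]

-- single-character replace is a flatMap
theorem replace_go_single (v : Char) (new : List Char) (l acc : List Char) (fuel : Nat)
    (h : l.length ≤ fuel) :
    PySem.Chars.replace.go [v] new fuel l acc
      = acc.reverse ++ l.flatMap (fun c => if c = v then new else [c]) := by
  induction l generalizing fuel acc with
  | nil => cases fuel <;> simp [PySem.Chars.replace.go]
  | cons c t ih =>
      cases fuel with
      | zero => simp at h
      | succ fuel =>
        have ht : t.length ≤ fuel := by simpa using h
        by_cases hc : c = v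
        · subst hc
          simp [PySem.Chars.replace.go, List.isPrefixOf, ih _ _ ht]
        · have : (v == c) = false := by simp [Ne.symm hc]
          simp [PySem.Chars.replace.go, List.isPrefixOf, this, ih _ _ ht, hc]

theorem replace_single (v : Char) (new : List Char) (l : List Char) :
    PySem.Chars.replace l [v] new = l.flatMap (fun c => if c = v then new else [c]) := by
  simp [PySem.Chars.replace, replace_go_single v new l [] l.length le_rfl]

-- the five staged passes, on lists
theorem toList_foldl_replace (l : List Char) (s : String) :
    (l.foldl (fun t v => PySem.Str.replace t (String.ofList [v]) (String.ofList [v, v, v, v])) s).toList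
      = l.foldl (fun t v => PySem.Chars.replace t [v] [v, v, v, v]) s.toList := by
  induction l generalizing s with
  | nil => rfl
  | cons v rest ih =>
      rw [List.foldl_cons, List.foldl_cons, ih]
      simp [PySem.Str.replace]

theorem stages_eq_flatMap (cs : List Char) :
    ['a', 'e', 'i', 'o', 'u'].foldl (fun t v => PySem.Chars.replace t [v] [v, v, v, v]) cs
      = cs.flatMap pvQuad := by
  simp only [List.foldl, replace_single, List.flatMap_assoc]
  refine List.flatMap_congr (fun c _ => ?_)
  by_cases h : c ∈ ['a', 'e', 'i', 'o', 'u']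
  · fin_cases h <;> decide
  · simp only [List.mem_cons, List.not_mem_nil, or_false, not_or] at h
    obtain ⟨ha, he, hi, ho, hu⟩ := h
    simp [pvQuad, ha, he, hi, ho, hu]

theorem ofList_append (l₁ l₂ : List Char) :
    String.ofList (l₁ ++ l₂) = String.ofList l₁ ++ String.ofList l₂ := by
  apply String.toList_injective; simp

-- A's loop computes the same flatMap
theorem exclamationLoop_eq (l : List Char) (acc : String) :
    exclamationLoop l acc = acc ++ String.ofList (l.flatMap pvQuad) := by
  induction l generalizing acc with
  | nil => simp [exclamationLoop]
  | cons c rest ih =>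
      simp only [exclamationLoop, ih, List.flatMap_cons, ofList_append, pvQuad]
      split <;> simp [String.append_assoc]

-- ===== VERDICT (by name: the statement is the Claim_ definition above) =====
theorem exclamation_spec : Claim_equal_exclamation := by
  intro s _
  unfold Spec_exclamation exclamation exclamation_alt
  rw [exclamationLoop_eq]
  apply String.toList_injective
  rw [String.toList_append, String.toList_append, String.toList_append,
    toList_foldl_replace, show "aeiou".toList = ['a', 'e', 'i', 'o', 'u'] from rfl,
    stages_eq_flatMap]
  simp
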